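-- pv_equiv track=rewrite | github.com/megerbyte/forms | demo_extraction.py | infer_data_type
-- ===== SOURCE A (Python) =====
-- def infer_data_type(field_text):
--     """Infer data type from field text."""
--     field_lower = field_text.lower()
--
--     if any(w in field_lower for w in ['date', 'day', 'month', 'year']):
--         return 'date'
--     elif any(w in field_lower for w in ['email', 'e-mail']):
--         return 'email'
--     elif any(w in field_lower for w in ['phone', 'telephone', 'fax']):
--         return 'phone'
--     elif any(w in field_lower for w in ['amount', 'dollar', 'price', 'cost', 'fee', 'payment']):
--         return 'currency'
--     elif any(w in field_lower for w in ['number', 'count', 'quantity']):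
--         return 'integer'
--     elif 'yes/no' in field_lower or 'true/false' in field_lower:
--         return 'boolean'
--
--     return 'text'
-- ===== SOURCE B (Python) =====
-- _PRIO = {
--     'date': (0, 'date'), 'day': (0, 'date'), 'month': (0, 'date'), 'year': (0, 'date'),
--     'email': (1, 'email'), 'e-mail': (1, 'email'),
--     'phone': (2, 'phone'), 'telephone': (2, 'phone'), 'fax': (2, 'phone'),
--     'amount': (3, 'currency'), 'dollar': (3, 'currency'), 'price': (3, 'currency'),
--     'cost': (3, 'currency'), 'fee': (3, 'currency'), 'payment': (3, 'currency'),
--     'number': (4, 'integer'), 'count': (4, 'integer'), 'quantity': (4, 'integer'),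
--     'yes/no': (5, 'boolean'), 'true/false': (5, 'boolean'),
-- }
-- _LENS = [3, 4, 5, 6, 7, 8, 9, 10]
--
-- def infer_data_type(field_text):
--     """Infer data type from field text: slide over the lowercased text once,
--     hashing each candidate window into a keyword table; lowest priority wins."""
--     low = field_text.lower()
--     best = None
--     for j in range(len(low)):
--         for L in _LENS:
--             hit = _PRIO.get(low[j:j+L])
--             if hit is not None and (best is None or hit[0] < best[0]):
--                 best = hit
--     return best[1] if best is not None else 'text'
-- ===== Notes on version B (the rewrite author's own statement) =====
-- stated objective: alternative
-- what changed: Instead of testing each keyword group for substring containment branch by branch, B slides once over the lowercased text and hashes every window of the 8 possible keyword lengths into a keyword->(priority,dtype) table, keeping the lowest-priority hit; the priority order reproduces A's branch precedence.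
import Mathlib
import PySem

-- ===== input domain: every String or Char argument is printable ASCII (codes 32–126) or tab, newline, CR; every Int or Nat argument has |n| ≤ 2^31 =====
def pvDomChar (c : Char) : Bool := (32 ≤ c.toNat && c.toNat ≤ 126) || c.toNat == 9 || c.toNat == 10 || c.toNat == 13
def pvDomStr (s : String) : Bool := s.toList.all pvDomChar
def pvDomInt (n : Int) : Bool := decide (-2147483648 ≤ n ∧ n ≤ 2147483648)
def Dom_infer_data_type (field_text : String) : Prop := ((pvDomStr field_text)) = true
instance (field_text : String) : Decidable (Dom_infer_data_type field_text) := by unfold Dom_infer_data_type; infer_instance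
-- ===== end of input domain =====

-- B replaces A's per-keyword substring tests by a single sliding scan of the text with a keyword hash table (alternative algorithm; same behaviour).


-- ===== PORT A =====
def infer_data_type (field_text : String) : String :=
  let field_lower := PySem.Str.lower field_text
  if ["date", "day", "month", "year"].any (fun w => PySem.Str.isIn w field_lower) then "date"
  else if ["email", "e-mail"].any (fun w => PySem.Str.isIn w field_lower) then "email"
  else if ["phone", "telephone", "fax"].any (fun w => PySem.Str.isIn w field_lower) then "phone"
  else if ["amount", "dollar", "price", "cost", "fee", "payment"].any (fun w => PySem.Str.isIn w field_lower) then "currency"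
  else if ["number", "count", "quantity"].any (fun w => PySem.Str.isIn w field_lower) then "integer"
  else if PySem.Str.isIn "yes/no" field_lower || PySem.Str.isIn "true/false" field_lower then "boolean"
  else "text"

-- ===== PORT B =====
-- B-side: the keyword table _PRIO : keyword -> (priority, dtype)
def pvPrio : PySem.Dict String (Int × String) :=
  ⟨[("date", (0, "date")), ("day", (0, "date")), ("month", (0, "date")), ("year", (0, "date")),
    ("email", (1, "email")), ("e-mail", (1, "email")),
    ("phone", (2, "phone")), ("telephone", (2, "phone")), ("fax", (2, "phone")),
    ("amount", (3, "currency")), ("dollar", (3, "currency")), ("price", (3, "currency")),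
    ("cost", (3, "currency")), ("fee", (3, "currency")), ("payment", (3, "currency")),
    ("number", (4, "integer")), ("count", (4, "integer")), ("quantity", (4, "integer")),
    ("yes/no", (5, "boolean")), ("true/false", (5, "boolean"))]⟩

-- B-side: _LENS, the possible keyword lengths
def pvLens : List Int := [3, 4, 5, 6, 7, 8, 9, 10]

-- B-side: one update of the running best hit ('if hit is not None and (best is None or hit[0] < best[0])')
def pvStep (best : Option (Int × String)) (hit? : Option (Int × String)) : Option (Int × String) :=
  match hit? with
  | some hit =>
    match best with
    | none => some hit
    | some b => if hit.1 < b.1 then some hit else best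
  | none => best

def infer_data_type_alt (field_text : String) : String :=
  let low := PySem.Str.lower field_text
  let best := (PySem.List.pyRange 0 (PySem.Str.len low) 1).foldl
    (fun best j => pvLens.foldl
      (fun best L =>
        pvStep best (PySem.Dict.get? pvPrio (PySem.Str.slice low (some j) (some (j + L))))) best)
    none
  match best with
  | some b => b.2
  | none => "text"

-- ===== PRECONDITION & SPEC =====
def Spec_infer_data_type (field_text : String) (out : String) : Prop := out = infer_data_type_alt field_text
instance (field_text : String) (out : String) : Decidable (Spec_infer_data_type field_text out) := by unfold Spec_infer_data_type; infer_instance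

-- ===== CLAIM (what is proved, stated in full; the proofs are below) =====
def Claim_equal_infer_data_type : Prop := ∀ (field_text : String), Dom_infer_data_type field_text → Spec_infer_data_type field_text (infer_data_type field_text)

-- ===== LEMMAS AND PROOFS =====

-- the candidate looked up at window (j, L)
def pvCand (low : String) (jL : Int × Int) : Option (Int × String) :=
  PySem.Dict.get? pvPrio (PySem.Str.slice low (some jL.1) (some (jL.1 + jL.2)))

-- all windows, in B's scan order
def pvPairs (low : String) : List (Int × Int) :=
  (PySem.List.pyRange 0 (PySem.Str.len low) 1).flatMap (fun j => pvLens.map (fun L => (j, L)))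

def pvCands (low : String) : List (Option (Int × String)) := (pvPairs low).map (pvCand low)

theorem pvFoldlFlatMap {α β γ : Type} (h : α → List β) (f : γ → β → γ) (l : List α) (init : γ) :
    (l.flatMap h).foldl f init = l.foldl (fun b a => (h a).foldl f b) init := by
  induction l generalizing init with
  | nil => rfl
  | cons a t ih => simp [List.flatMap_cons, List.foldl_append, ih]

theorem pvNestedEq (low : String) :
    ((PySem.List.pyRange 0 (PySem.Str.len low) 1).foldl
      (fun best j => pvLens.foldl
        (fun best L =>
          pvStep best (PySem.Dict.get? pvPrio (PySem.Str.slice low (some j) (some (j + L))))) best)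
      none)
    = (pvCands low).foldl pvStep none := by
  unfold pvCands pvPairs
  rw [List.foldl_map, pvFoldlFlatMap]
  simp only [List.foldl_map, pvCand]

theorem pvAltEq (ft : String) :
    infer_data_type_alt ft =
      (match (pvCands (PySem.Str.lower ft)).foldl pvStep none with
       | some b => b.2
       | none => "text") := by
  simp only [infer_data_type_alt, pvNestedEq]

-- the fold result is the initial state or one of the candidates
theorem pvFoldlAttained (cs : List (Option (Int × String))) (b : Option (Int × String)) :
    cs.foldl pvStep b = b ∨ cs.foldl pvStep b ∈ cs := by
  induction cs generalizing b with
  | nil => exact Or.inl rfl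
  | cons c t ih =>
    rcases ih (pvStep b c) with h | h
    · rw [List.foldl_cons, h]
      unfold pvStep
      rcases c with _ | hit
      · exact Or.inl rfl
      · rcases b with _ | bb
        · exact Or.inr (List.mem_cons_self)
        · by_cases hlt : hit.1 < bb.1 <;> simp [hlt]
    · exact Or.inr (List.mem_cons_of_mem _ h)

-- the fold result's priority is ≤ every candidate's and the initial state's
theorem pvFoldlMin (cs : List (Option (Int × String))) (b : Option (Int × String))
    (p : Int) (d : String) (h : cs.foldl pvStep b = some (p, d)) :
    (∀ q e, b = some (q, e) → p ≤ q) ∧ (∀ q e, some (q, e) ∈ cs → p ≤ q) := by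
  induction cs generalizing b with
  | nil =>
    refine ⟨fun q e hb => ?_, fun q e hq => by simp at hq⟩
    rw [List.foldl_nil] at h; rw [h] at hb
    injection hb with hb'; injection hb' with h1 _; omega
  | cons c t ih =>
    rw [List.foldl_cons] at h
    obtain ⟨ih1, ih2⟩ := ih (pvStep b c) h
    have hb : ∀ q e, b = some (q, e) → p ≤ q := by
      intro q e hb
      rcases c with _ | hit
      · exact ih1 q e (by simpa [pvStep] using hb)
      · by_cases hlt : hit.1 < q
        · have := ih1 hit.1 hit.2 (by simp [pvStep, hb, hlt])
          omega
        · exact ih1 q e (by simp [pvStep, hb, hlt])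
    refine ⟨hb, fun q e hq => ?_⟩
    rcases List.mem_cons.mp hq with rfl | hq
    · rcases hbb : b with _ | bb
      · exact ih1 q e (by simp [pvStep, hbb])
      · by_cases hlt : q < bb.1
        · exact ih1 q e (by simp [pvStep, hbb, hlt])
        · have := hb bb.1 bb.2 (by rw [hbb])
          omega
    · exact ih2 q e hq

-- if the fold result is none, nothing matched
theorem pvFoldlNone (cs : List (Option (Int × String))) (b : Option (Int × String))
    (h : cs.foldl pvStep b = none) : b = none ∧ ∀ c ∈ cs, c = none := by
  induction cs generalizing b with
  | nil => exact ⟨h, by simp⟩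
  | cons c t ih =>
    rw [List.foldl_cons] at h
    obtain ⟨h1, h2⟩ := ih (pvStep b c) h
    rcases c with _ | hit
    · exact ⟨by simpa [pvStep] using h1, by simpa using h2⟩
    · exfalso
      rcases b with _ | bb
      · simp [pvStep] at h1
      · by_cases hlt : hit.1 < bb.1 <;> simp [pvStep, hlt] at h1

-- a table hit at a window is a keyword occurring in the text
theorem pvBridgeA (low : String) (p : Int) (d : String)
    (h : some (p, d) ∈ pvCands low) :
    ∃ k, (k, (p, d)) ∈ pvPrio.items ∧ PySem.Str.isIn k low = true := by
  obtain ⟨jL, hjL, hcand⟩ := List.mem_map.mp h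
  obtain ⟨j, hj, hmap⟩ := List.mem_flatMap.mp hjL
  obtain ⟨L, hL, rfl⟩ := List.mem_map.mp hmap
  have hj' := PySem.List.mem_pyRange_one.mp hj
  have hL0 : 0 ≤ L := by simp [pvLens] at hL; omega
  simp only [pvCand] at hcand
  unfold PySem.Dict.get? at hcand
  rw [Option.map_eq_some_iff] at hcand
  obtain ⟨pr, hfind, h2⟩ := hcand
  have hmem : pr ∈ pvPrio.items := List.mem_of_find?_eq_some hfind
  have hpred := List.find?_some hfind
  simp only [beq_iff_eq] at hpred
  have hkey : pr.1 = PySem.Str.slice low (some j) (some (j + L)) := hpred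
  refine ⟨pr.1, by rw [← h2, Prod.mk.eta]; exact hmem, ?_⟩
  rw [PySem.Str.isIn_eq, ← PySem.Chars.exists_prefix_drop_iff_isIn]
  refine ⟨j.toNat, ?_⟩
  rw [hkey, PySem.Str.toList_slice, PySem.Chars.slice_eq_listSlice,
    PySem.List.slice_toNat _ hj'.1 (by omega)]
  exact List.take_prefix _ _

-- a keyword of the table occurring in the text produces a hit at some window
theorem pvBridgeB (low k : String) (p : Int) (d : String)
    (hk : PySem.Dict.get? pvPrio k = some (p, d))
    (hlen : ((k.toList.length : Int)) ∈ pvLens) (hne : k.toList ≠ [])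
    (hin : PySem.Str.isIn k low = true) : some (p, d) ∈ pvCands low := by
  rw [PySem.Str.isIn_eq, ← PySem.Chars.exists_prefix_drop_iff_isIn] at hin
  obtain ⟨j, hpre⟩ := hin
  have hjlt : j < low.toList.length := by
    by_contra hge
    exact hne (List.prefix_nil.mp (by rwa [List.drop_eq_nil_of_le (by omega)] at hpre))
  have hslice : PySem.Str.slice low (some (j : Int)) (some ((j : Int) + (k.toList.length : Int))) = k := by
    rw [← String.toList_inj, PySem.Str.toList_slice, PySem.Chars.slice_eq_listSlice,
      PySem.List.slice_toNat _ (by omega) (by omega)]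
    rw [← Nat.cast_add, Int.toNat_natCast, Int.toNat_natCast]
    rw [Nat.add_sub_cancel_left]
    exact (List.prefix_iff_eq_take.mp hpre).symm
  refine List.mem_map.mpr ⟨((j : Int), (k.toList.length : Int)), ?_, ?_⟩
  · refine List.mem_flatMap.mpr ⟨(j : Int), PySem.List.mem_pyRange_one.mpr ⟨by omega, ?_⟩,
      List.mem_map.mpr ⟨(k.toList.length : Int), hlen, rfl⟩⟩
    simp only [PySem.Str.len_eq]
    omega
  · unfold pvCand
    rw [hslice, hk]

-- A's chain output, one lemma per branch
theorem pvA0 (ft k : String) (hmem : k ∈ (["date", "day", "month", "year"] : List String))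
    (hk : PySem.Str.isIn k (PySem.Str.lower ft) = true) : infer_data_type ft = "date" := by
  have hpos : (["date", "day", "month", "year"].any (fun w => PySem.Str.isIn w (PySem.Str.lower ft))) = true :=
    List.any_eq_true.mpr ⟨k, hmem, hk⟩
  simp only [infer_data_type]
  rw [if_pos hpos]

theorem pvA1 (ft k : String)
    (f1 : PySem.Str.isIn "date" (PySem.Str.lower ft) = false)
    (f2 : PySem.Str.isIn "day" (PySem.Str.lower ft) = false)
    (f3 : PySem.Str.isIn "month" (PySem.Str.lower ft) = false)
    (f4 : PySem.Str.isIn "year" (PySem.Str.lower ft) = false)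
    (hmem : k ∈ (["email", "e-mail"] : List String))
    (hk : PySem.Str.isIn k (PySem.Str.lower ft) = true) : infer_data_type ft = "email" := by
  have hpos : (["email", "e-mail"].any (fun w => PySem.Str.isIn w (PySem.Str.lower ft))) = true :=
    List.any_eq_true.mpr ⟨k, hmem, hk⟩
  have n1 : ¬ ((["date", "day", "month", "year"].any (fun w => PySem.Str.isIn w (PySem.Str.lower ft))) = true) := by
    simp only [List.any_cons, List.any_nil, f1, f2, f3, f4, Bool.or_self]
    simp
  simp only [infer_data_type]
  rw [if_neg n1, if_pos hpos]

theorem pvA2 (ft k : String)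
    (f1 : PySem.Str.isIn "date" (PySem.Str.lower ft) = false)
    (f2 : PySem.Str.isIn "day" (PySem.Str.lower ft) = false)
    (f3 : PySem.Str.isIn "month" (PySem.Str.lower ft) = false)
    (f4 : PySem.Str.isIn "year" (PySem.Str.lower ft) = false)
    (f5 : PySem.Str.isIn "email" (PySem.Str.lower ft) = false)
    (f6 : PySem.Str.isIn "e-mail" (PySem.Str.lower ft) = false)
    (hmem : k ∈ (["phone", "telephone", "fax"] : List String))
    (hk : PySem.Str.isIn k (PySem.Str.lower ft) = true) : infer_data_type ft = "phone" := by
  have hpos : (["phone", "telephone", "fax"].any (fun w => PySem.Str.isIn w (PySem.Str.lower ft))) = true :=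
    List.any_eq_true.mpr ⟨k, hmem, hk⟩
  have n1 : ¬ ((["date", "day", "month", "year"].any (fun w => PySem.Str.isIn w (PySem.Str.lower ft))) = true) := by
    simp only [List.any_cons, List.any_nil, f1, f2, f3, f4, Bool.or_self]
    simp
  have n2 : ¬ ((["email", "e-mail"].any (fun w => PySem.Str.isIn w (PySem.Str.lower ft))) = true) := by
    simp only [List.any_cons, List.any_nil, f5, f6, Bool.or_self]
    simp
  simp only [infer_data_type]
  rw [if_neg n1, if_neg n2, if_pos hpos]

theorem pvA3 (ft k : String)
    (f1 : PySem.Str.isIn "date" (PySem.Str.lower ft) = false)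
    (f2 : PySem.Str.isIn "day" (PySem.Str.lower ft) = false)
    (f3 : PySem.Str.isIn "month" (PySem.Str.lower ft) = false)
    (f4 : PySem.Str.isIn "year" (PySem.Str.lower ft) = false)
    (f5 : PySem.Str.isIn "email" (PySem.Str.lower ft) = false)
    (f6 : PySem.Str.isIn "e-mail" (PySem.Str.lower ft) = false)
    (f7 : PySem.Str.isIn "phone" (PySem.Str.lower ft) = false)
    (f8 : PySem.Str.isIn "telephone" (PySem.Str.lower ft) = false)
    (f9 : PySem.Str.isIn "fax" (PySem.Str.lower ft) = false)
    (hmem : k ∈ (["amount", "dollar", "price", "cost", "fee", "payment"] : List String))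
    (hk : PySem.Str.isIn k (PySem.Str.lower ft) = true) : infer_data_type ft = "currency" := by
  have hpos : (["amount", "dollar", "price", "cost", "fee", "payment"].any (fun w => PySem.Str.isIn w (PySem.Str.lower ft))) = true :=
    List.any_eq_true.mpr ⟨k, hmem, hk⟩
  have n1 : ¬ ((["date", "day", "month", "year"].any (fun w => PySem.Str.isIn w (PySem.Str.lower ft))) = true) := by
    simp only [List.any_cons, List.any_nil, f1, f2, f3, f4, Bool.or_self]
    simp
  have n2 : ¬ ((["email", "e-mail"].any (fun w => PySem.Str.isIn w (PySem.Str.lower ft))) = true) := by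
    simp only [List.any_cons, List.any_nil, f5, f6, Bool.or_self]
    simp
  have n3 : ¬ ((["phone", "telephone", "fax"].any (fun w => PySem.Str.isIn w (PySem.Str.lower ft))) = true) := by
    simp only [List.any_cons, List.any_nil, f7, f8, f9, Bool.or_self]
    simp
  simp only [infer_data_type]
  rw [if_neg n1, if_neg n2, if_neg n3, if_pos hpos]

theorem pvA4 (ft k : String)
    (f1 : PySem.Str.isIn "date" (PySem.Str.lower ft) = false)
    (f2 : PySem.Str.isIn "day" (PySem.Str.lower ft) = false)
    (f3 : PySem.Str.isIn "month" (PySem.Str.lower ft) = false)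
    (f4 : PySem.Str.isIn "year" (PySem.Str.lower ft) = false)
    (f5 : PySem.Str.isIn "email" (PySem.Str.lower ft) = false)
    (f6 : PySem.Str.isIn "e-mail" (PySem.Str.lower ft) = false)
    (f7 : PySem.Str.isIn "phone" (PySem.Str.lower ft) = false)
    (f8 : PySem.Str.isIn "telephone" (PySem.Str.lower ft) = false)
    (f9 : PySem.Str.isIn "fax" (PySem.Str.lower ft) = false)
    (f10 : PySem.Str.isIn "amount" (PySem.Str.lower ft) = false)
    (f11 : PySem.Str.isIn "dollar" (PySem.Str.lower ft) = false)
    (f12 : PySem.Str.isIn "price" (PySem.Str.lower ft) = false)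
    (f13 : PySem.Str.isIn "cost" (PySem.Str.lower ft) = false)
    (f14 : PySem.Str.isIn "fee" (PySem.Str.lower ft) = false)
    (f15 : PySem.Str.isIn "payment" (PySem.Str.lower ft) = false)
    (hmem : k ∈ (["number", "count", "quantity"] : List String))
    (hk : PySem.Str.isIn k (PySem.Str.lower ft) = true) : infer_data_type ft = "integer" := by
  have hpos : (["number", "count", "quantity"].any (fun w => PySem.Str.isIn w (PySem.Str.lower ft))) = true :=
    List.any_eq_true.mpr ⟨k, hmem, hk⟩
  have n1 : ¬ ((["date", "day", "month", "year"].any (fun w => PySem.Str.isIn w (PySem.Str.lower ft))) = true) := by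
    simp only [List.any_cons, List.any_nil, f1, f2, f3, f4, Bool.or_self]
    simp
  have n2 : ¬ ((["email", "e-mail"].any (fun w => PySem.Str.isIn w (PySem.Str.lower ft))) = true) := by
    simp only [List.any_cons, List.any_nil, f5, f6, Bool.or_self]
    simp
  have n3 : ¬ ((["phone", "telephone", "fax"].any (fun w => PySem.Str.isIn w (PySem.Str.lower ft))) = true) := by
    simp only [List.any_cons, List.any_nil, f7, f8, f9, Bool.or_self]
    simp
  have n4 : ¬ ((["amount", "dollar", "price", "cost", "fee", "payment"].any (fun w => PySem.Str.isIn w (PySem.Str.lower ft))) = true) := by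
    simp only [List.any_cons, List.any_nil, f10, f11, f12, f13, f14, f15, Bool.or_self]
    simp
  simp only [infer_data_type]
  rw [if_neg n1, if_neg n2, if_neg n3, if_neg n4, if_pos hpos]

theorem pvA5 (ft k : String)
    (f1 : PySem.Str.isIn "date" (PySem.Str.lower ft) = false)
    (f2 : PySem.Str.isIn "day" (PySem.Str.lower ft) = false)
    (f3 : PySem.Str.isIn "month" (PySem.Str.lower ft) = false)
    (f4 : PySem.Str.isIn "year" (PySem.Str.lower ft) = false)
    (f5 : PySem.Str.isIn "email" (PySem.Str.lower ft) = false)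
    (f6 : PySem.Str.isIn "e-mail" (PySem.Str.lower ft) = false)
    (f7 : PySem.Str.isIn "phone" (PySem.Str.lower ft) = false)
    (f8 : PySem.Str.isIn "telephone" (PySem.Str.lower ft) = false)
    (f9 : PySem.Str.isIn "fax" (PySem.Str.lower ft) = false)
    (f10 : PySem.Str.isIn "amount" (PySem.Str.lower ft) = false)
    (f11 : PySem.Str.isIn "dollar" (PySem.Str.lower ft) = false)
    (f12 : PySem.Str.isIn "price" (PySem.Str.lower ft) = false)
    (f13 : PySem.Str.isIn "cost" (PySem.Str.lower ft) = false)
    (f14 : PySem.Str.isIn "fee" (PySem.Str.lower ft) = false)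
    (f15 : PySem.Str.isIn "payment" (PySem.Str.lower ft) = false)
    (f16 : PySem.Str.isIn "number" (PySem.Str.lower ft) = false)
    (f17 : PySem.Str.isIn "count" (PySem.Str.lower ft) = false)
    (f18 : PySem.Str.isIn "quantity" (PySem.Str.lower ft) = false)
    (hmem : k ∈ (["yes/no", "true/false"] : List String))
    (hk : PySem.Str.isIn k (PySem.Str.lower ft) = true) : infer_data_type ft = "boolean" := by
  have hpos : (PySem.Str.isIn "yes/no" (PySem.Str.lower ft) || PySem.Str.isIn "true/false" (PySem.Str.lower ft)) = true := by
    rcases List.mem_cons.mp hmem with rfl | hmem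
    · rw [hk]; rw [Bool.true_or]
    · rcases List.mem_cons.mp hmem with rfl | hmem
      · rw [hk]; rw [Bool.or_true]
      · simp at hmem
  have n1 : ¬ ((["date", "day", "month", "year"].any (fun w => PySem.Str.isIn w (PySem.Str.lower ft))) = true) := by
    simp only [List.any_cons, List.any_nil, f1, f2, f3, f4, Bool.or_self]
    simp
  have n2 : ¬ ((["email", "e-mail"].any (fun w => PySem.Str.isIn w (PySem.Str.lower ft))) = true) := by
    simp only [List.any_cons, List.any_nil, f5, f6, Bool.or_self]
    simp
  have n3 : ¬ ((["phone", "telephone", "fax"].any (fun w => PySem.Str.isIn w (PySem.Str.lower ft))) = true) := by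
    simp only [List.any_cons, List.any_nil, f7, f8, f9, Bool.or_self]
    simp
  have n4 : ¬ ((["amount", "dollar", "price", "cost", "fee", "payment"].any (fun w => PySem.Str.isIn w (PySem.Str.lower ft))) = true) := by
    simp only [List.any_cons, List.any_nil, f10, f11, f12, f13, f14, f15, Bool.or_self]
    simp
  have n5 : ¬ ((["number", "count", "quantity"].any (fun w => PySem.Str.isIn w (PySem.Str.lower ft))) = true) := by
    simp only [List.any_cons, List.any_nil, f16, f17, f18, Bool.or_self]
    simp
  simp only [infer_data_type]
  rw [if_neg n1, if_neg n2, if_neg n3, if_neg n4, if_neg n5, if_pos hpos]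

-- A returns "text" when no keyword occurs
theorem pvAtext (ft : String)
    (f1 : PySem.Str.isIn "date" (PySem.Str.lower ft) = false)
    (f2 : PySem.Str.isIn "day" (PySem.Str.lower ft) = false)
    (f3 : PySem.Str.isIn "month" (PySem.Str.lower ft) = false)
    (f4 : PySem.Str.isIn "year" (PySem.Str.lower ft) = false)
    (f5 : PySem.Str.isIn "email" (PySem.Str.lower ft) = false)
    (f6 : PySem.Str.isIn "e-mail" (PySem.Str.lower ft) = false)
    (f7 : PySem.Str.isIn "phone" (PySem.Str.lower ft) = false)
    (f8 : PySem.Str.isIn "telephone" (PySem.Str.lower ft) = false)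
    (f9 : PySem.Str.isIn "fax" (PySem.Str.lower ft) = false)
    (f10 : PySem.Str.isIn "amount" (PySem.Str.lower ft) = false)
    (f11 : PySem.Str.isIn "dollar" (PySem.Str.lower ft) = false)
    (f12 : PySem.Str.isIn "price" (PySem.Str.lower ft) = false)
    (f13 : PySem.Str.isIn "cost" (PySem.Str.lower ft) = false)
    (f14 : PySem.Str.isIn "fee" (PySem.Str.lower ft) = false)
    (f15 : PySem.Str.isIn "payment" (PySem.Str.lower ft) = false)
    (f16 : PySem.Str.isIn "number" (PySem.Str.lower ft) = false)
    (f17 : PySem.Str.isIn "count" (PySem.Str.lower ft) = false)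
    (f18 : PySem.Str.isIn "quantity" (PySem.Str.lower ft) = false)
    (f19 : PySem.Str.isIn "yes/no" (PySem.Str.lower ft) = false)
    (f20 : PySem.Str.isIn "true/false" (PySem.Str.lower ft) = false) :
    infer_data_type ft = "text" := by
  have n1 : ¬ ((["date", "day", "month", "year"].any (fun w => PySem.Str.isIn w (PySem.Str.lower ft))) = true) := by
    simp only [List.any_cons, List.any_nil, f1, f2, f3, f4, Bool.or_self]
    simp
  have n2 : ¬ ((["email", "e-mail"].any (fun w => PySem.Str.isIn w (PySem.Str.lower ft))) = true) := by
    simp only [List.any_cons, List.any_nil, f5, f6, Bool.or_self]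
    simp
  have n3 : ¬ ((["phone", "telephone", "fax"].any (fun w => PySem.Str.isIn w (PySem.Str.lower ft))) = true) := by
    simp only [List.any_cons, List.any_nil, f7, f8, f9, Bool.or_self]
    simp
  have n4 : ¬ ((["amount", "dollar", "price", "cost", "fee", "payment"].any (fun w => PySem.Str.isIn w (PySem.Str.lower ft))) = true) := by
    simp only [List.any_cons, List.any_nil, f10, f11, f12, f13, f14, f15, Bool.or_self]
    simp
  have n5 : ¬ ((["number", "count", "quantity"].any (fun w => PySem.Str.isIn w (PySem.Str.lower ft))) = true) := by
    simp only [List.any_cons, List.any_nil, f16, f17, f18, Bool.or_self]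
    simp
  have n6 : ¬ ((PySem.Str.isIn "yes/no" (PySem.Str.lower ft) || PySem.Str.isIn "true/false" (PySem.Str.lower ft)) = true) := by
    rw [f19, f20]; simp
  simp only [infer_data_type]
  rw [if_neg n1, if_neg n2, if_neg n3, if_neg n4, if_neg n5, if_neg n6]

-- ===== VERDICT (by name: the statement is the Claim_ definition above) =====
theorem infer_data_type_spec : Claim_equal_infer_data_type := by
  intro ft _
  unfold Spec_infer_data_type
  rw [pvAltEq]
  rcases hr : (pvCands (PySem.Str.lower ft)).foldl pvStep none with _ | ⟨p, d⟩
  · -- nothing matched: every keyword is absent, A returns "text"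
    have hnone := (pvFoldlNone _ _ hr).2
    have nf : ∀ (k : String) (q : Int) (e : String), PySem.Dict.get? pvPrio k = some (q, e) →
        ((k.toList.length : Int)) ∈ pvLens → k.toList ≠ [] →
        PySem.Str.isIn k (PySem.Str.lower ft) = false := by
      intro k q e h1 h2 h3
      cases hM : PySem.Str.isIn k (PySem.Str.lower ft) with
      | false => rfl
      | true => exact absurd (hnone _ (pvBridgeB _ k q e h1 h2 h3 hM)) (by simp)
    exact pvAtext ft
      (nf "date" 0 "date" rfl (by decide) (by decide))
      (nf "day" 0 "date" rfl (by decide) (by decide))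
      (nf "month" 0 "date" rfl (by decide) (by decide))
      (nf "year" 0 "date" rfl (by decide) (by decide))
      (nf "email" 1 "email" rfl (by decide) (by decide))
      (nf "e-mail" 1 "email" rfl (by decide) (by decide))
      (nf "phone" 2 "phone" rfl (by decide) (by decide))
      (nf "telephone" 2 "phone" rfl (by decide) (by decide))
      (nf "fax" 2 "phone" rfl (by decide) (by decide))
      (nf "amount" 3 "currency" rfl (by decide) (by decide))
      (nf "dollar" 3 "currency" rfl (by decide) (by decide))
      (nf "price" 3 "currency" rfl (by decide) (by decide))
      (nf "cost" 3 "currency" rfl (by decide) (by decide))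
      (nf "fee" 3 "currency" rfl (by decide) (by decide))
      (nf "payment" 3 "currency" rfl (by decide) (by decide))
      (nf "number" 4 "integer" rfl (by decide) (by decide))
      (nf "count" 4 "integer" rfl (by decide) (by decide))
      (nf "quantity" 4 "integer" rfl (by decide) (by decide))
      (nf "yes/no" 5 "boolean" rfl (by decide) (by decide))
      (nf "true/false" 5 "boolean" rfl (by decide) (by decide))
  · -- some keyword matched: the fold's (p, d) is the lowest-priority match
    have hmin := (pvFoldlMin _ _ _ _ hr).2
    have hatt : some (p, d) ∈ pvCands (PySem.Str.lower ft) := by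
      rcases pvFoldlAttained (pvCands (PySem.Str.lower ft)) none with h | h
      · rw [hr] at h; exact absurd h (by simp)
      · rwa [hr] at h
    obtain ⟨k, hkmem, hkIn⟩ := pvBridgeA _ _ _ hatt
    have nlt : ∀ (k' : String) (q : Int) (e : String), PySem.Dict.get? pvPrio k' = some (q, e) →
        ((k'.toList.length : Int)) ∈ pvLens → k'.toList ≠ [] → q < p →
        PySem.Str.isIn k' (PySem.Str.lower ft) = false := by
      intro k' q e h1 h2 h3 hqp
      cases hM : PySem.Str.isIn k' (PySem.Str.lower ft) with
      | false => rfl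
      | true => exact absurd (hmin q e (pvBridgeB _ k' q e h1 h2 h3 hM)) (by omega)
    have x1 : (0:Int) < p → _ := nlt "date" 0 "date" rfl (by decide) (by decide)
    have x2 : (0:Int) < p → _ := nlt "day" 0 "date" rfl (by decide) (by decide)
    have x3 : (0:Int) < p → _ := nlt "month" 0 "date" rfl (by decide) (by decide)
    have x4 : (0:Int) < p → _ := nlt "year" 0 "date" rfl (by decide) (by decide)
    have x5 : (1:Int) < p → _ := nlt "email" 1 "email" rfl (by decide) (by decide)
    have x6 : (1:Int) < p → _ := nlt "e-mail" 1 "email" rfl (by decide) (by decide)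
    have x7 : (2:Int) < p → _ := nlt "phone" 2 "phone" rfl (by decide) (by decide)
    have x8 : (2:Int) < p → _ := nlt "telephone" 2 "phone" rfl (by decide) (by decide)
    have x9 : (2:Int) < p → _ := nlt "fax" 2 "phone" rfl (by decide) (by decide)
    have x10 : (3:Int) < p → _ := nlt "amount" 3 "currency" rfl (by decide) (by decide)
    have x11 : (3:Int) < p → _ := nlt "dollar" 3 "currency" rfl (by decide) (by decide)
    have x12 : (3:Int) < p → _ := nlt "price" 3 "currency" rfl (by decide) (by decide)
    have x13 : (3:Int) < p → _ := nlt "cost" 3 "currency" rfl (by decide) (by decide)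
    have x14 : (3:Int) < p → _ := nlt "fee" 3 "currency" rfl (by decide) (by decide)
    have x15 : (3:Int) < p → _ := nlt "payment" 3 "currency" rfl (by decide) (by decide)
    have x16 : (4:Int) < p → _ := nlt "number" 4 "integer" rfl (by decide) (by decide)
    have x17 : (4:Int) < p → _ := nlt "count" 4 "integer" rfl (by decide) (by decide)
    have x18 : (4:Int) < p → _ := nlt "quantity" 4 "integer" rfl (by decide) (by decide)
    simp only [pvPrio, List.mem_cons, List.not_mem_nil, or_false, Prod.mk.injEq] at hkmem
    rcases hkmem with ⟨rfl, rfl, rfl⟩ | ⟨rfl, rfl, rfl⟩ | ⟨rfl, rfl, rfl⟩ | ⟨rfl, rfl, rfl⟩ |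
      ⟨rfl, rfl, rfl⟩ | ⟨rfl, rfl, rfl⟩ | ⟨rfl, rfl, rfl⟩ | ⟨rfl, rfl, rfl⟩ | ⟨rfl, rfl, rfl⟩ |
      ⟨rfl, rfl, rfl⟩ | ⟨rfl, rfl, rfl⟩ | ⟨rfl, rfl, rfl⟩ | ⟨rfl, rfl, rfl⟩ | ⟨rfl, rfl, rfl⟩ |
      ⟨rfl, rfl, rfl⟩ | ⟨rfl, rfl, rfl⟩ | ⟨rfl, rfl, rfl⟩ | ⟨rfl, rfl, rfl⟩ | ⟨rfl, rfl, rfl⟩ |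
      ⟨rfl, rfl, rfl⟩
    · exact pvA0 ft "date" (by decide) hkIn
    · exact pvA0 ft "day" (by decide) hkIn
    · exact pvA0 ft "month" (by decide) hkIn
    · exact pvA0 ft "year" (by decide) hkIn
    · exact pvA1 ft "email" (x1 (by omega)) (x2 (by omega)) (x3 (by omega)) (x4 (by omega)) (by decide) hkIn
    · exact pvA1 ft "e-mail" (x1 (by omega)) (x2 (by omega)) (x3 (by omega)) (x4 (by omega)) (by decide) hkIn
    · exact pvA2 ft "phone" (x1 (by omega)) (x2 (by omega)) (x3 (by omega)) (x4 (by omega)) (x5 (by omega)) (x6 (by omega)) (by decide) hkIn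
    · exact pvA2 ft "telephone" (x1 (by omega)) (x2 (by omega)) (x3 (by omega)) (x4 (by omega)) (x5 (by omega)) (x6 (by omega)) (by decide) hkIn
    · exact pvA2 ft "fax" (x1 (by omega)) (x2 (by omega)) (x3 (by omega)) (x4 (by omega)) (x5 (by omega)) (x6 (by omega)) (by decide) hkIn
    · exact pvA3 ft "amount" (x1 (by omega)) (x2 (by omega)) (x3 (by omega)) (x4 (by omega)) (x5 (by omega)) (x6 (by omega)) (x7 (by omega)) (x8 (by omega)) (x9 (by omega)) (by decide) hkIn
    · exact pvA3 ft "dollar" (x1 (by omega)) (x2 (by omega)) (x3 (by omega)) (x4 (by omega)) (x5 (by omega)) (x6 (by omega)) (x7 (by omega)) (x8 (by omega)) (x9 (by omega)) (by decide) hkIn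
    · exact pvA3 ft "price" (x1 (by omega)) (x2 (by omega)) (x3 (by omega)) (x4 (by omega)) (x5 (by omega)) (x6 (by omega)) (x7 (by omega)) (x8 (by omega)) (x9 (by omega)) (by decide) hkIn
    · exact pvA3 ft "cost" (x1 (by omega)) (x2 (by omega)) (x3 (by omega)) (x4 (by omega)) (x5 (by omega)) (x6 (by omega)) (x7 (by omega)) (x8 (by omega)) (x9 (by omega)) (by decide) hkIn
    · exact pvA3 ft "fee" (x1 (by omega)) (x2 (by omega)) (x3 (by omega)) (x4 (by omega)) (x5 (by omega)) (x6 (by omega)) (x7 (by omega)) (x8 (by omega)) (x9 (by omega)) (by decide) hkIn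
    · exact pvA3 ft "payment" (x1 (by omega)) (x2 (by omega)) (x3 (by omega)) (x4 (by omega)) (x5 (by omega)) (x6 (by omega)) (x7 (by omega)) (x8 (by omega)) (x9 (by omega)) (by decide) hkIn
    · exact pvA4 ft "number" (x1 (by omega)) (x2 (by omega)) (x3 (by omega)) (x4 (by omega)) (x5 (by omega)) (x6 (by omega)) (x7 (by omega)) (x8 (by omega)) (x9 (by omega)) (x10 (by omega)) (x11 (by omega)) (x12 (by omega)) (x13 (by omega)) (x14 (by omega)) (x15 (by omega)) (by decide) hkIn
    · exact pvA4 ft "count" (x1 (by omega)) (x2 (by omega)) (x3 (by omega)) (x4 (by omega)) (x5 (by omega)) (x6 (by omega)) (x7 (by omega)) (x8 (by omega)) (x9 (by omega)) (x10 (by omega)) (x11 (by omega)) (x12 (by omega)) (x13 (by omega)) (x14 (by omega)) (x15 (by omega)) (by decide) hkIn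
    · exact pvA4 ft "quantity" (x1 (by omega)) (x2 (by omega)) (x3 (by omega)) (x4 (by omega)) (x5 (by omega)) (x6 (by omega)) (x7 (by omega)) (x8 (by omega)) (x9 (by omega)) (x10 (by omega)) (x11 (by omega)) (x12 (by omega)) (x13 (by omega)) (x14 (by omega)) (x15 (by omega)) (by decide) hkIn
    · exact pvA5 ft "yes/no" (x1 (by omega)) (x2 (by omega)) (x3 (by omega)) (x4 (by omega)) (x5 (by omega)) (x6 (by omega)) (x7 (by omega)) (x8 (by omega)) (x9 (by omega)) (x10 (by omega)) (x11 (by omega)) (x12 (by omega)) (x13 (by omega)) (x14 (by omega)) (x15 (by omega)) (x16 (by omega)) (x17 (by omega)) (x18 (by omega)) (by decide) hkIn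
    · exact pvA5 ft "true/false" (x1 (by omega)) (x2 (by omega)) (x3 (by omega)) (x4 (by omega)) (x5 (by omega)) (x6 (by omega)) (x7 (by omega)) (x8 (by omega)) (x9 (by omega)) (x10 (by omega)) (x11 (by omega)) (x12 (by omega)) (x13 (by omega)) (x14 (by omega)) (x15 (by omega)) (x16 (by omega)) (x17 (by omega)) (x18 (by omega)) (by decide) hkIn
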